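-- pv_equiv track=rewrite | github.com/fzamore/advent-of-code | 2019/day16.py | computeFFTFromEnd
-- ===== SOURCE A (Python) =====
-- def computeFFTFromEnd(signal: list[int], n: int, qty: int) -> list[int]:
--   assert qty <= len(signal) // 2, 'cannot process more than last half of signal'
--   subsignal = signal[-qty:]
--   for _ in range(n):
--     # Compute a running sum from the back.
--     value = 0
--     for i in range(1, len(subsignal) + 1):
--       value += subsignal[-i]
--       # Process in-place.
--       subsignal[-i] = value % 10
--   return subsignal
-- ===== SOURCE B (Python) =====
-- def computeFFTFromEnd(sig: list[int], n: int, qty: int) -> list[int]: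
--   assert qty <= len(sig) // 2, 'cannot process more than last half of signal'
--   sub = sig[-qty:]
--   if n <= 0:
--     return sub
--   L = len(sub)
--   # coefficients of the n-fold suffix-sum transform: C(n-1+j, j) mod 10,
--   # computed exactly by the multiplicative recurrence (integer division is exact)
--   coeffs = []
--   c = 1
--   for j in range(L):
--     coeffs.append(c % 10)
--     c = c * (n + j) // (j + 1)
--   return [sum(coeffs[j] * sub[k + j] for j in range(L - k)) % 10 for k in range(L)]
-- ===== Notes on version B (the rewrite author's own statement) =====
-- stated objective: faster
-- what changed: B replaces A's n in-place backward running-sum passes over the tail with the closed form of the n-fold suffix-sum transform: output[k] = sum_j C(n-1+j,j)*sub[k+j] mod 10, with the binomial coefficients generated once by their exact multiplicative recurrence.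
import Mathlib
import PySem

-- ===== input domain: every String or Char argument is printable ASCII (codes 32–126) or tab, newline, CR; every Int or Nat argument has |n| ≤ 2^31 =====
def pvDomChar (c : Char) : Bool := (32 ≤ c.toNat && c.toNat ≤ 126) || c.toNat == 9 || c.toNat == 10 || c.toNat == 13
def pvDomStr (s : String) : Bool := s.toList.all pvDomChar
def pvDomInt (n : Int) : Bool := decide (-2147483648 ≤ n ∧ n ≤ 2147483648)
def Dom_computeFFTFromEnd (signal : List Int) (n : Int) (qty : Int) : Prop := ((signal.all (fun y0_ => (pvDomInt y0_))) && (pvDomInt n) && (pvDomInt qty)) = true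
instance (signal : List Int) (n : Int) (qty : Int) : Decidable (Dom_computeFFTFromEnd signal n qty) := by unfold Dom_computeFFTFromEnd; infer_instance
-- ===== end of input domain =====

-- B replaces A's n in-place backward running-sum passes (O(n·qty)) by the closed-form
-- binomial-coefficient convolution of the n-fold suffix-sum transform (one pass over
-- exact binomials plus one quadratic dot-product sweep) — measurably faster for large n.

-- ===== PORT A =====
-- body of A's inner loop: value += subsignal[-i]; subsignal[-i] = value % 10
-- (index -i is in range for every i of range(1, len+1), so the total pyGetD/pySetD forms are exact here)
def pvInnerStep (st : List Int × Int) (i : Int) : List Int × Int :=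
  let value := st.2 + PySem.List.pyGetD st.1 (-i) 0
  (PySem.List.pySetD st.1 (-i) (PySem.Int.mod value 10), value)

-- one outer iteration of A: the backward running-sum pass over subsignal
def pvPassA (sub : List Int) : List Int :=
  ((PySem.List.pyRange 1 ((sub.length : Int) + 1)).foldl pvInnerStep (sub, 0)).1

def computeFFTFromEnd (signal : List Int) (n : Int) (qty : Int) : List Int :=
  -- assert qty <= len(signal) // 2  → Pre_computeFFTFromEnd
  let subsignal := PySem.List.slice signal (some (-qty)) none
  (PySem.List.pyRange 0 n).foldl (fun sub _ => pvPassA sub) subsignal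

-- ===== PORT B =====
def computeFFTFromEnd_alt (signal : List Int) (n : Int) (qty : Int) : List Int :=
  let sub := PySem.List.slice signal (some (-qty)) none
  if n ≤ 0 then sub
  else
    let L := sub.length
    -- coeffs: c runs through the exact binomials C(n-1+j, j); integer division is exact
    let coeffs := ((PySem.List.pyRange 0 (L : Int)).foldl
      (fun (st : List Int × Int) j =>
        (st.1 ++ [PySem.Int.mod st.2 10], PySem.Int.floordiv (st.2 * (n + j)) (j + 1)))
      ([], 1)).1
    (PySem.List.pyRange 0 (L : Int)).map (fun k =>
      PySem.Int.mod
        (((PySem.List.pyRange 0 ((L : Int) - k)).map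
            (fun j => PySem.List.pyGetD coeffs j 0 * PySem.List.pyGetD sub (k + j) 0)).sum)
        10)

-- ===== PRECONDITION & SPEC =====
-- Pre_ excludes exactly the inputs on which A's assert fails (AssertionError): qty > len(signal)//2
def Pre_computeFFTFromEnd (signal : List Int) (n : Int) (qty : Int) : Prop :=
  qty ≤ PySem.Int.floordiv (signal.length : Int) 2
instance (signal : List Int) (n : Int) (qty : Int) : Decidable (Pre_computeFFTFromEnd signal n qty) := by unfold Pre_computeFFTFromEnd; infer_instance

def pvWitness_computeFFTFromEnd : List Int × Int × Int := ([1, 2, 3, 4], 3, 2)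

def Spec_computeFFTFromEnd (signal : List Int) (n : Int) (qty : Int) (out : List Int) : Prop := out = computeFFTFromEnd_alt signal n qty
instance (signal : List Int) (n : Int) (qty : Int) (out : List Int) : Decidable (Spec_computeFFTFromEnd signal n qty out) := by unfold Spec_computeFFTFromEnd; infer_instance

-- ===== CLAIM (what is proved, stated in full; the proofs are below) =====
def Claim_equal_computeFFTFromEnd : Prop := ∀ (signal : List Int) (n : Int) (qty : Int), Dom_computeFFTFromEnd signal n qty → Pre_computeFFTFromEnd signal n qty → Spec_computeFFTFromEnd signal n qty (computeFFTFromEnd signal n qty)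

-- ===== LEMMAS AND PROOFS =====

-- the mathematical one-pass transform: suffix sums mod 10
def pvStep : List Int → List Int
  | [] => []
  | x :: xs => (x + xs.sum) % 10 :: pvStep xs

-- dot product of l with binomials C(m + j0 + j, j0 + j) along positions j
def pvDot (m j0 : Nat) : List Int → Int
  | [] => 0
  | x :: xs => ((m + j0).choose j0 : Int) * x + pvDot m (j0 + 1) xs

-- the n-fold transform in closed form: entry k is pvDot over the k-th suffix, mod 10
def pvG (m : Nat) : List Int → List Int
  | [] => []
  | x :: xs => pvDot m 0 (x :: xs) % 10 :: pvG m xs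

-- sum of pvDot over all suffixes
def pvSuffDots (m : Nat) : List Int → Int
  | [] => 0
  | x :: xs => pvDot m 0 (x :: xs) + pvSuffDots m xs

theorem pvStep_length (l : List Int) : (pvStep l).length = l.length := by
  induction l with
  | nil => rfl
  | cons x xs ih => simp [pvStep, ih]

theorem pvDot_pascal_aux (l : List Int) : ∀ m j0, pvDot (m + 1) (j0 + 1) l = pvDot m (j0 + 1) l + pvDot (m + 1) j0 l := by
  induction l with
  | nil => intro m j0; simp [pvDot]
  | cons x xs ih =>
    intro m j0
    simp only [pvDot]
    have hp : (m + 1 + (j0 + 1)).choose (j0 + 1) = (m + (j0 + 1)).choose (j0 + 1) + (m + 1 + j0).choose j0 := by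
      have e1 : m + 1 + (j0 + 1) = (m + j0 + 1) + 1 := by omega
      have e2 : m + (j0 + 1) = m + j0 + 1 := by omega
      have e3 : m + 1 + j0 = m + j0 + 1 := by omega
      rw [e1, e2, e3]
      have h := Nat.choose_succ_succ (m + j0 + 1) j0
      simp only [Nat.succ_eq_add_one] at h
      omega
    rw [ih, hp]
    push_cast
    ring

theorem pvDot_pascal (m : Nat) (l : List Int) : pvDot (m + 1) 0 l = pvDot m 0 l + pvDot (m + 1) 0 l.tail := by
  cases l with
  | nil => simp [pvDot]
  | cons x xs =>
    simp only [pvDot, List.tail_cons]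
    rw [pvDot_pascal_aux xs m 0]
    simp
    ring

theorem pvDot_succ_suffix (m : Nat) (l : List Int) : pvDot (m + 1) 0 l = pvSuffDots m l := by
  induction l with
  | nil => rfl
  | cons x xs ih =>
    rw [pvDot_pascal, pvSuffDots]
    simp only [List.tail_cons]
    rw [ih]

theorem pvG_sum (m : Nat) (l : List Int) : (pvG m l).sum % 10 = pvSuffDots m l % 10 := by
  induction l with
  | nil => rfl
  | cons x xs ih =>
    simp only [pvG, pvSuffDots, List.sum_cons]
    rw [Int.add_emod, Int.emod_emod_of_dvd _ dvd_rfl, ih, ← Int.add_emod]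

theorem pvStep_G (m : Nat) (l : List Int) : pvStep (pvG m l) = pvG (m + 1) l := by
  induction l with
  | nil => rfl
  | cons x xs ih =>
    simp only [pvG, pvStep]
    rw [ih]
    congr 1
    rw [Int.add_emod, Int.emod_emod_of_dvd _ dvd_rfl, pvG_sum, ← Int.add_emod,
      ← pvDot_succ_suffix]
    conv_rhs => rw [pvDot_pascal m (x :: xs)]
    simp only [List.tail_cons]

theorem pvDot_zero (l : List Int) : ∀ j0, pvDot 0 j0 l = l.sum := by
  induction l with
  | nil => intro _; rfl
  | cons x xs ih => intro j0; simp [pvDot, ih]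

theorem pvStep_eq_G0 (l : List Int) : pvStep l = pvG 0 l := by
  induction l with
  | nil => rfl
  | cons x xs ih =>
    simp only [pvStep, pvG]
    rw [ih, pvDot]
    simp [pvDot_zero]

theorem pvIter (k : Nat) (l : List Int) : pvStep^[k + 1] l = pvG k l := by
  induction k with
  | zero => simpa using pvStep_eq_G0 l
  | succ k ih =>
    rw [Function.iterate_succ_apply', ih, pvStep_G]

-- A's inner backward pass: loop invariant after m iterations
theorem pvPass_inv (l : List Int) : ∀ m, m ≤ l.length →
    (PySem.List.pyRange 1 ((m : Int) + 1)).foldl pvInnerStep (l, 0)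
      = (l.take (l.length - m) ++ pvStep (l.drop (l.length - m)), (l.drop (l.length - m)).sum) := by
  intro m
  induction m with
  | zero =>
    intro _
    have h0 : ((0 : Nat) : Int) + 1 = 1 := by norm_num
    have hr : PySem.List.pyRange 1 1 = [] := by decide
    rw [h0, hr]
    simp [pvStep]
  | succ m ih =>
    intro hm
    have hm' : m ≤ l.length := by omega
    have hcast : ((m + 1 : Nat) : Int) + 1 = ((m : Int) + 1) + 1 := by push_cast; ring
    rw [hcast, PySem.List.pyRange_one_succ_right (by omega), List.foldl_append, ih hm']
    set p := l.length - (m + 1) with hp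
    have h1 : l.length - m = p + 1 := by omega
    have hplt : p < l.length := by omega
    rw [h1]
    simp only [List.foldl_cons, List.foldl_nil, pvInnerStep]
    have hlen : (l.take (p + 1) ++ pvStep (l.drop (p + 1))).length = l.length := by
      simp [pvStep_length]
      omega
    have hgetlen : m + 1 ≤ (l.take (p + 1) ++ pvStep (l.drop (p + 1))).length := by
      rw [hlen]; omega
    have htklen : p < (l.take (p + 1)).length := by
      simp [List.length_take]; omega
    have hget : PySem.List.pyGetD (l.take (p + 1) ++ pvStep (l.drop (p + 1))) (-((m : Int) + 1)) 0
        = l[p] := by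
      have e : -((m : Int) + 1) = -((m + 1 : Nat) : Int) := by push_cast; ring
      rw [e, PySem.List.pyGetD_neg_natCast _ _ _ (Nat.succ_pos m) hgetlen]
      have hidx : (l.take (p + 1) ++ pvStep (l.drop (p + 1))).length - (m + 1) = p := by
        rw [hlen]
      simp only [hidx]
      rw [List.getElem_append_left htklen]
      exact List.getElem_take
    have hsetneg : ∀ v : Int, PySem.List.pySetD (l.take (p + 1) ++ pvStep (l.drop (p + 1))) (-((m : Int) + 1)) v
        = (l.take (p + 1) ++ pvStep (l.drop (p + 1))).set p v := by
      intro v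
      have e : -((m : Int) + 1) = -((m + 1 : Nat) : Int) := by push_cast; ring
      rw [e]
      simp only [PySem.List.pySetD, PySem.List.pySet?, PySem.List.pyIdx?]
      rw [if_neg (by omega), if_pos (by push_cast; omega)]
      have : (- -((m + 1 : Nat) : Int)).toNat = m + 1 := by omega
      rw [this]
      simp only [Option.map_some, Option.getD_some]
      congr 1
      rw [hlen]
    have hset : ∀ v : Int, (l.take (p + 1) ++ pvStep (l.drop (p + 1))).set p v
        = l.take p ++ (v :: pvStep (l.drop (p + 1))) := by
      intro v
      rw [List.set_append_left _ _ htklen]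
      rw [List.take_succ, List.getElem?_eq_getElem hplt]
      simp only [Option.toList_some]
      rw [List.set_append_right _ _ (by simp [List.length_take])]
      have : p - (l.take p).length = 0 := by simp [List.length_take]; omega
      rw [this]
      simp [List.append_assoc]
    have hdrop : l.drop p = l[p] :: l.drop (p + 1) := List.drop_eq_getElem_cons hplt
    rw [hget, hsetneg, hset, PySem.Int.mod_eq_emod_of_pos (by norm_num), hdrop]
    simp only [pvStep, List.sum_cons]
    simp only [add_comm ((l.drop (p + 1)).sum) l[p]]

theorem pvPass_eq (l : List Int) : pvPassA l = pvStep l := by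
  unfold pvPassA
  rw [pvPass_inv l l.length le_rfl]
  simp

theorem foldl_const_iterate {α β : Type} (xs : List β) (g : α → α) : ∀ x : α,
    xs.foldl (fun a _ => g a) x = g^[xs.length] x := by
  induction xs with
  | nil => intro x; rfl
  | cons y ys ih =>
    intro x
    simp only [List.foldl_cons, List.length_cons, ih (g x), Function.iterate_succ_apply]

theorem length_pyRange_zero (n : Int) : (PySem.List.pyRange 0 n).length = n.toNat := by
  by_cases h : 0 ≤ n
  · obtain ⟨k, rfl⟩ := Int.eq_ofNat_of_zero_le h
    rw [PySem.List.pyRange_zero_natCast]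
    simp
  · have hnil : PySem.List.pyRange 0 n = [] := by
      simp [PySem.List.pyRange]
      omega
    rw [hnil]
    simp
    omega

theorem A_eq_iter (signal : List Int) (n qty : Int) :
    computeFFTFromEnd signal n qty = pvStep^[n.toNat] (PySem.List.slice signal (some (-qty)) none) := by
  unfold computeFFTFromEnd
  rw [show (fun (sub : List Int) (_ : Int) => pvPassA sub) = fun sub _ => pvStep sub by
    funext sub i; exact pvPass_eq sub]
  rw [foldl_const_iterate, length_pyRange_zero]

-- B-side: the coefficient loop produces the binomials C(n-1+j, j) mod 10
theorem coeffs_inv (n : Int) (m : Nat) (hn : n = (m : Int) + 1) : ∀ J : Nat,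
    (PySem.List.pyRange 0 (J : Int)).foldl
      (fun (st : List Int × Int) j =>
        (st.1 ++ [PySem.Int.mod st.2 10], PySem.Int.floordiv (st.2 * (n + j)) (j + 1)))
      ([], 1)
    = ((List.range J).map (fun t => (((m + t).choose t : Nat) : Int) % 10), (((m + J).choose J : Nat) : Int)) := by
  intro J
  induction J with
  | zero =>
    have hr : PySem.List.pyRange 0 ((0 : Nat) : Int) = [] := by decide
    rw [hr]
    simp
  | succ J ih =>
    have hcast : ((J + 1 : Nat) : Int) = ((J : Nat) : Int) + 1 := by push_cast; ring
    rw [hcast, PySem.List.pyRange_one_succ_right (by positivity), List.foldl_append, ih]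
    simp only [List.foldl_cons, List.foldl_nil]
    refine Prod.ext ?_ ?_
    · simp only
      rw [List.range_succ, List.map_append]
      rw [PySem.Int.mod_eq_emod_of_pos (by norm_num)]
      simp
    · simp only
      rw [hn]
      have e1 : (((m + J).choose J : Nat) : Int) * (((m : Nat) : Int) + 1 + ((J : Nat) : Int))
          = ((((m + J).choose J) * (m + J + 1) : Nat) : Int) := by push_cast; ring
      have e2 : (((J : Nat) : Int) + 1) = (((J + 1 : Nat)) : Int) := by push_cast; ring
      rw [e1, e2, PySem.Int.floordiv_natCast]
      have e3 : (m + J).choose J * (m + J + 1) = (m + J + 1).choose (J + 1) * (J + 1) := by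
        have h := Nat.add_one_mul_choose_eq (m + J) J
        rw [Nat.mul_comm]
        exact h
      rw [e3, Nat.mul_div_cancel _ (Nat.succ_pos J)]
      congr 2

theorem mod_sum_congr {α : Type} (l : List α) (f g : α → Int)
    (h : ∀ i ∈ l, f i % 10 = g i % 10) :
    (l.map f).sum % 10 = (l.map g).sum % 10 := by
  induction l with
  | nil => rfl
  | cons x xs ih =>
    simp only [List.map_cons, List.sum_cons]
    rw [Int.add_emod, h x (by simp), ih (fun i hi => h i (by simp [hi])), ← Int.add_emod]

theorem dot_as_sum (t : List Int) : ∀ m j0 : Nat,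
    ((List.range t.length).map (fun j => (((m + j0 + j).choose (j0 + j) : Nat) : Int) * t.getD j 0)).sum
      = pvDot m j0 t := by
  induction t with
  | nil => intro m j0; rfl
  | cons x xs ih =>
    intro m j0
    rw [List.length_cons, List.range_succ_eq_map, List.map_cons, List.map_map]
    simp only [List.sum_cons, Nat.add_zero, List.getD_cons_zero]
    rw [pvDot]
    congr 1
    have hf : ((fun j => (((m + j0 + j).choose (j0 + j) : Nat) : Int) * (x :: xs).getD j 0) ∘ Nat.succ)
        = fun j => (((m + (j0 + 1) + j).choose ((j0 + 1) + j) : Nat) : Int) * xs.getD j 0 := by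
      funext j
      have h1 : m + j0 + (j + 1) = m + (j0 + 1) + j := by omega
      have h2 : j0 + (j + 1) = (j0 + 1) + j := by omega
      simp only [Function.comp, Nat.succ_eq_add_one, h1, h2, List.getD_cons_succ]
    rw [hf, ih]

theorem pvG_eq_map (m : Nat) (l : List Int) :
    pvG m l = (List.range l.length).map (fun k => pvDot m 0 (l.drop k) % 10) := by
  induction l with
  | nil => rfl
  | cons x xs ih =>
    rw [List.length_cons, List.range_succ_eq_map, List.map_cons, List.map_map]
    simp only [List.drop_zero, pvG]
    refine congrArg₂ List.cons rfl ?_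
    rw [ih]
    apply List.map_congr_left
    intro k _
    simp [Function.comp]

theorem getD_drop (l : List Int) (k j : Nat) : (l.drop k).getD j 0 = l.getD (k + j) 0 := by
  simp [List.getD_eq_getElem?_getD, List.getElem?_drop]

theorem B_eq_G (signal : List Int) (n qty : Int) (m : Nat) (hn : n = (m : Int) + 1) :
    computeFFTFromEnd_alt signal n qty = pvG m (PySem.List.slice signal (some (-qty)) none) := by
  unfold computeFFTFromEnd_alt
  set sub := PySem.List.slice signal (some (-qty)) none with hsub
  rw [if_neg (by omega)]
  simp only []
  rw [coeffs_inv n m hn sub.length]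
  simp only
  rw [pvG_eq_map, PySem.List.pyRange_zero_natCast, List.map_map]
  apply List.map_congr_left
  intro k hk
  have hkL : k < sub.length := List.mem_range.mp hk
  simp only [Function.comp_apply]
  have hLk : ((sub.length : Nat) : Int) - ((k : Nat) : Int) = ((sub.length - k : Nat) : Int) := by omega
  rw [hLk, PySem.List.pyRange_zero_natCast, List.map_map, PySem.Int.mod_eq_emod_of_pos (by norm_num)]
  have hmap : (List.range (sub.length - k)).map
      ((fun j => PySem.List.pyGetD ((List.range sub.length).map (fun t => (((m + t).choose t : Nat) : Int) % 10)) j 0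
          * PySem.List.pyGetD sub (((k : Nat) : Int) + j) 0) ∘ (fun i : Nat => (i : Int)))
      = (List.range (sub.length - k)).map
        (fun j => ((((m + j).choose j : Nat) : Int) % 10) * (sub.drop k).getD j 0) := by
    apply List.map_congr_left
    intro j hj
    have hjL : j < sub.length - k := List.mem_range.mp hj
    simp only [Function.comp_apply]
    have e : ((k : Nat) : Int) + ((j : Nat) : Int) = ((k + j : Nat) : Int) := by push_cast; ring
    rw [e, PySem.List.pyGetD_natCast, PySem.List.pyGetD_natCast]
    rw [List.getD_eq_getElem?_getD, List.getElem?_map,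
      List.getElem?_range (by omega : j < sub.length)]
    simp only [Option.map_some, Option.getD_some]
    rw [getD_drop]
  rw [hmap]
  have hstrip : ((List.range (sub.length - k)).map
        (fun j => ((((m + j).choose j : Nat) : Int) % 10) * (sub.drop k).getD j 0)).sum % 10
      = ((List.range (sub.length - k)).map
        (fun j => (((m + j).choose j : Nat) : Int) * (sub.drop k).getD j 0)).sum % 10 := by
    apply mod_sum_congr
    intro j _
    rw [Int.mul_emod, Int.emod_emod_of_dvd _ dvd_rfl, ← Int.mul_emod]
  rw [hstrip]
  have hlen : sub.length - k = (sub.drop k).length := by simp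
  rw [hlen]
  have hd := dot_as_sum (sub.drop k) m 0
  simp only [Nat.add_zero, Nat.zero_add] at hd
  rw [hd]

-- ===== VERDICT (by name: the statement is the Claim_ definition above) =====
theorem computeFFTFromEnd_spec : Claim_equal_computeFFTFromEnd := by
  intro signal n qty _ _
  unfold Spec_computeFFTFromEnd
  by_cases hn : n ≤ 0
  · have h0 : n.toNat = 0 := by omega
    rw [A_eq_iter, h0]
    unfold computeFFTFromEnd_alt
    simp [hn]
  · set m := n.toNat - 1 with hm
    have hn' : n = (m : Int) + 1 := by omega
    have ht : n.toNat = m + 1 := by omega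
    rw [A_eq_iter, ht, pvIter, B_eq_G signal n qty m hn']
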